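-- pv_equiv track=rewrite | github.com/aleksandrabruska/probabilistyczne | main.py | check_for_k
-- ===== SOURCE A (Python) =====
-- def check_for_k(K, seq):
--     ks = 0
--     for i in range(len(seq)):
--         if ks == K:
--             return True
--         if seq[i] == 1:
--             ks = ks + 1
--         else:
--             ks = 0
--     return False
-- ===== SOURCE B (Python) =====
-- def check_for_k(K, seq):
--     n = len(seq)
--     if K < 0 or K > n:
--         return False
--     pref = [0]
--     for x in seq:
--         pref.append(pref[-1] + (1 if x == 1 else 0))
--     return any(pref[s + K] - pref[s] == K for s in range(n - K + 1))
-- ===== Notes on version B (the rewrite author's own statement) =====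
-- stated objective: alternative
-- what changed: Replaced A's incremental run counter with early return by a prefix-sum array of ones-counts plus a window test pref[s+K]-pref[s]==K over all window starts, which also fixes A's off-by-one that misses a run of K ones ending at the very end of seq.
-- intended difference: On inputs with 0 <= K <= len(seq) whose only run of K consecutive ones is the suffix ending exactly at the end of seq (including K=0 with seq=[]), A returns False because its ks==K test runs only before consuming a further element, while B returns True, the intended answer to 'does seq contain K consecutive ones'. — e.g. on check_for_k(2, [1, 1]): A returns false, B returns true
import Mathlib
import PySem

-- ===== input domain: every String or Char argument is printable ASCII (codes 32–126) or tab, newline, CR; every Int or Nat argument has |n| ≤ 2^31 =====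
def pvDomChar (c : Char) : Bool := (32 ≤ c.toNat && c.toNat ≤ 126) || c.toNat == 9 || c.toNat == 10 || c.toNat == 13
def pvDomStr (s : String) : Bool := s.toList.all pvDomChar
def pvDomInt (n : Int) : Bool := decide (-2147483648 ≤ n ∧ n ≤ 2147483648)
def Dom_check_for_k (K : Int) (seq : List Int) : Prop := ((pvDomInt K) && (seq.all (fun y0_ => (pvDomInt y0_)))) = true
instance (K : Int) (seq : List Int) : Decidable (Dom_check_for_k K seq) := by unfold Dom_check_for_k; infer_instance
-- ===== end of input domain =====

-- B replaces A's incremental run counter with a prefix-sum array and a window test, and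
-- deliberately fixes A's off-by-one (a run of K ones ending exactly at the end of seq):
-- the difference is stated in D_check_for_k below.

-- ===== PORT A =====
-- the for-loop over range(len(seq)) with early return, as structural recursion over seq
def checkGo (K ks : Int) (l : List Int) : Bool :=
  match l with
  | [] => false
  | x :: rest => if ks == K then true else checkGo K (if x == 1 then ks + 1 else 0) rest

def check_for_k (K : Int) (seq : List Int) : Bool := checkGo K 0 seq

-- ===== PORT B =====
def check_for_k_alt (K : Int) (seq : List Int) : Bool :=
  let n : Int := seq.length
  if K < 0 || n < K then false
  else
    let pref : List Int :=
      seq.foldl (fun acc x => acc ++ [PySem.List.pyGetD acc (-1) 0 + (if x == 1 then 1 else 0)]) [0]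
    (PySem.List.pyRange 0 (n - K + 1) 1).any fun s =>
      PySem.List.pyGetD pref (s + K) 0 - PySem.List.pyGetD pref s 0 == K

-- ===== PRECONDITION & SPEC =====
-- On inputs with 0 ≤ K ≤ len(seq) whose only run of K consecutive ones is the suffix ending
-- exactly at the end of seq (including K=0 with seq=[]), A returns False because its ks==K test
-- runs only before consuming a further element, while B returns True, the intended answer to
-- "does seq contain K consecutive ones".
def D_check_for_k (K : Int) (seq : List Int) : Prop :=
  0 ≤ K ∧ K.toNat ≤ seq.length ∧
  (∀ j, seq.length - K.toNat ≤ j → j < seq.length → seq.getD j 0 = 1) ∧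
  ¬ ∃ e, e < seq.length ∧ K.toNat ≤ e ∧ ∀ j, e - K.toNat ≤ j → j < e → seq.getD j 0 = 1

instance (K : Int) (seq : List Int) : Decidable (D_check_for_k K seq) := by
  unfold D_check_for_k; infer_instance

def Spec_check_for_k (K : Int) (seq : List Int) (out : Bool) : Prop :=
  ¬ D_check_for_k K seq → out = check_for_k_alt K seq
instance (K : Int) (seq : List Int) (out : Bool) : Decidable (Spec_check_for_k K seq out) := by
  unfold Spec_check_for_k; infer_instance

def pvDiffWitness_check_for_k : Int × List Int := (2, [1, 1])
def pvDiffWitnessOut_check_for_k : Bool × Bool := (false, true)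

-- ===== CLAIM (what is proved, stated in full; the proofs are below) =====
def Claim_unchanged_check_for_k : Prop := ∀ (K : Int) (seq : List Int), Dom_check_for_k K seq → Spec_check_for_k K seq (check_for_k K seq)
def Claim_changed_check_for_k : Prop := Dom_check_for_k (pvDiffWitness_check_for_k.1) (pvDiffWitness_check_for_k.2) ∧ D_check_for_k (pvDiffWitness_check_for_k.1) (pvDiffWitness_check_for_k.2) ∧ check_for_k (pvDiffWitness_check_for_k.1) (pvDiffWitness_check_for_k.2) = pvDiffWitnessOut_check_for_k.1 ∧ check_for_k_alt (pvDiffWitness_check_for_k.1) (pvDiffWitness_check_for_k.2) = pvDiffWitnessOut_check_for_k.2 ∧ pvDiffWitnessOut_check_for_k.1 ≠ pvDiffWitnessOut_check_for_k.2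
def Claim_exact_check_for_k : Prop := ∀ (K : Int) (seq : List Int), Dom_check_for_k K seq → D_check_for_k K seq → check_for_k K seq ≠ check_for_k_alt K seq

-- ===== LEMMAS AND PROOFS =====

-- the value of A's counter ks after e iterations, starting from m
def runE : ℕ → List Int → ℕ → ℕ
  | m, _, 0 => m
  | m, [], _+1 => m
  | m, x :: xs, e+1 => runE (if x = 1 then m + 1 else 0) xs e

-- "the k elements of l ending just before position e are all ones"
def Wend (l : List Int) (k e : ℕ) : Prop :=
  k ≤ e ∧ ∀ j, e - k ≤ j → j < e → l.getD j 0 = 1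

theorem checkGo_iff (l : List Int) (K : Int) (m : ℕ) :
    checkGo K (m : Int) l = true ↔ ∃ e, e < l.length ∧ ((runE m l e : ℕ) : Int) = K := by
  induction l generalizing m with
  | nil => simp [checkGo]
  | cons x xs ih =>
    have hcast : (if x == 1 then (m : Int) + 1 else 0) = ((if x = 1 then m + 1 else 0 : ℕ) : Int) := by
      by_cases h : x = 1 <;> simp [h]
    constructor
    · intro h
      simp only [checkGo] at h
      by_cases hm : (m : Int) = K
      · exact ⟨0, by simp, by simpa [runE] using hm⟩
      · rw [if_neg (by simpa using hm), hcast, ih] at h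
        obtain ⟨e, he, hr⟩ := h
        exact ⟨e + 1, by simpa using Nat.succ_lt_succ he, by simpa [runE] using hr⟩
    · rintro ⟨e, he, hr⟩
      simp only [checkGo]
      by_cases hm : (m : Int) = K
      · simp [hm]
      · rw [if_neg (by simpa using hm), hcast, ih]
        match e with
        | 0 => exact absurd (by simpa [runE] using hr) hm
        | e + 1 =>
          exact ⟨e, by simpa using Nat.lt_of_succ_lt_succ he, by simpa [runE] using hr⟩

theorem runE_succ (l : List Int) (m e : ℕ) (he : e < l.length) :
    runE m l (e + 1) = if l.getD e 0 = 1 then runE m l e + 1 else 0 := by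
  induction l generalizing m e with
  | nil => simp at he
  | cons x xs ih =>
    match e with
    | 0 => simp [runE]
    | e + 1 =>
      have := ih (if x = 1 then m + 1 else 0) e (by simpa using Nat.lt_of_succ_lt_succ he)
      simpa [runE] using this

theorem runE_wend (l : List Int) : ∀ e, e ≤ l.length → Wend l (runE 0 l e) e := by
  intro e
  induction e with
  | zero => intro _; exact ⟨Nat.le_refl 0, by intro j h1 h2; omega⟩
  | succ e ih =>
    intro he
    have he' : e < l.length := he
    obtain ⟨hle, hwin⟩ := ih (Nat.le_of_lt he')
    rw [runE_succ l 0 e he']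
    by_cases hx : l.getD e 0 = 1
    · rw [if_pos hx]
      refine ⟨by omega, ?_⟩
      intro j h1 h2
      by_cases hj : j = e
      · exact hj ▸ hx
      · exact hwin j (by omega) (by omega)
    · rw [if_neg hx]
      exact ⟨Nat.zero_le _, by intro j h1 h2; omega⟩

theorem wend_le_runE (l : List Int) : ∀ e, e ≤ l.length → ∀ k, Wend l k e → k ≤ runE 0 l e := by
  intro e
  induction e with
  | zero =>
    intro _ k hk
    have h0 : runE 0 l 0 = 0 := by cases l <;> rfl
    have := hk.1
    omega
  | succ e ih =>
    intro he k hk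
    obtain ⟨hke, hwin⟩ := hk
    match k with
    | 0 => exact Nat.zero_le _
    | j + 1 =>
      have he' : e < l.length := he
      have hlast : l.getD e 0 = 1 := hwin e (by omega) (by omega)
      have hj : j ≤ runE 0 l e := by
        refine ih (Nat.le_of_lt he') j ⟨by omega, ?_⟩
        intro i h1 h2
        exact hwin i (by omega) (by omega)
      rw [runE_succ l 0 e he', if_pos hlast]
      omega
  
theorem runE_hits (l : List Int) : ∀ e, e ≤ l.length → ∀ k, k ≤ runE 0 l e →
    ∃ e', e' ≤ e ∧ runE 0 l e' = k := by
  intro e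
  induction e with
  | zero =>
    intro _ k hk
    have h0 : runE 0 l 0 = 0 := by cases l <;> rfl
    exact ⟨0, Nat.le_refl 0, by omega⟩
  | succ e ih =>
    intro he k hk
    have he' : e < l.length := he
    rw [runE_succ l 0 e he'] at hk
    by_cases hx : l.getD e 0 = 1
    · rw [if_pos hx] at hk
      by_cases hk' : k ≤ runE 0 l e
      · obtain ⟨e', h1, h2⟩ := ih (Nat.le_of_lt he') k hk'
        exact ⟨e', by omega, h2⟩
      · refine ⟨e + 1, Nat.le_refl _, ?_⟩
        rw [runE_succ l 0 e he', if_pos hx]; omega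
    · rw [if_neg hx] at hk
      have h0 : runE 0 l 0 = 0 := by cases l <;> rfl
      exact ⟨0, Nat.zero_le _, by omega⟩

theorem A_iff (K : Int) (seq : List Int) :
    check_for_k K seq = true ↔ 0 ≤ K ∧ ∃ e, e < seq.length ∧ Wend seq K.toNat e := by
  have h0 : (0 : Int) = ((0 : ℕ) : Int) := rfl
  constructor
  · intro h
    rw [check_for_k, h0, checkGo_iff] at h
    obtain ⟨e, he, hr⟩ := h
    have hK : 0 ≤ K := hr ▸ Int.natCast_nonneg _
    have : K.toNat = runE 0 seq e := by omega
    exact ⟨hK, e, he, this ▸ runE_wend seq e (Nat.le_of_lt he)⟩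
  · rintro ⟨hK, e, he, hw⟩
    rw [check_for_k, h0, checkGo_iff]
    have h1 : K.toNat ≤ runE 0 seq e := wend_le_runE seq e (Nat.le_of_lt he) _ hw
    obtain ⟨e', h2, h3⟩ := runE_hits seq e (Nat.le_of_lt he) _ h1
    exact ⟨e', by omega, by rw [h3]; omega⟩

theorem window_iff (l : List Int) (σ k : ℕ) (h : σ + k ≤ l.length) :
    (l.drop σ).take k = List.replicate k 1 ↔ ∀ j, σ ≤ j → j < σ + k → l.getD j 0 = 1 := by
  rw [List.eq_replicate_iff]
  constructor
  · rintro ⟨hlen, hmem⟩ j h1 h2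
    have hj : j < l.length := by omega
    rw [List.getD_eq_getElem l 0 hj]
    refine hmem _ ?_
    rw [List.mem_iff_getElem]
    refine ⟨j - σ, ?_, ?_⟩
    · simp [List.length_take, List.length_drop]; omega
    · rw [List.getElem_take, List.getElem_drop]
      congr 1; omega
  · intro hw
    refine ⟨by simp [List.length_take, List.length_drop]; omega, ?_⟩
    intro b hb
    rw [List.mem_iff_getElem] at hb
    obtain ⟨i, hi, hbi⟩ := hb
    have hi' : i < k := by simp [List.length_take, List.length_drop] at hi; omega
    have hσi : σ + i < l.length := by omega
    rw [List.getElem_take, List.getElem_drop] at hbi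
    have := hw (σ + i) (by omega) (by omega)
    rw [List.getD_eq_getElem l 0 hσi] at this
    omega

-- count of ones in a list, as an Int
def cnt (l : List Int) : Int := (l.countP (fun x => x == 1) : Int)

theorem pyGetD_append_last (xs : List Int) (y : Int) :
    PySem.List.pyGetD (xs ++ [y]) (-1) 0 = y := by
  simp [PySem.List.pyGetD, PySem.List.pyGet?, PySem.List.pyIdx?]

theorem foldl_pref (l : List Int) : ∀ (P : List Int) (c : Int),
    l.foldl (fun acc x => acc ++ [PySem.List.pyGetD acc (-1) 0 + (if x == 1 then 1 else 0)]) (P ++ [c])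
      = (P ++ [c]) ++ (List.range l.length).map (fun i => c + cnt (l.take (i + 1))) := by
  induction l with
  | nil => intro P c; simp
  | cons x xs ih =>
    intro P c
    rw [List.foldl_cons, pyGetD_append_last, ih]
    rw [List.length_cons, List.range_succ_eq_map, List.map_cons, List.map_map]
    have h1 : c + cnt ((x :: xs).take (0 + 1)) = c + (if x == 1 then 1 else 0) := by
      simp [cnt, List.countP_cons]
    have h2 : ((fun i => c + cnt ((x :: xs).take (i + 1))) ∘ Nat.succ)
        = fun i => (c + (if x == 1 then 1 else 0)) + cnt (xs.take (i + 1)) := by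
      funext i
      simp only [Function.comp_apply, Nat.succ_eq_add_one, List.take_succ_cons, cnt,
        List.countP_cons]
      by_cases hx : x = 1
      · simp [hx]; ring
      · simp [hx]
    rw [h1, h2]
    simp [List.append_assoc]

theorem pref_getD (seq : List Int) (j : ℕ) (hj : j ≤ seq.length) :
    PySem.List.pyGetD
      (seq.foldl (fun acc x => acc ++ [PySem.List.pyGetD acc (-1) 0 + (if x == 1 then 1 else 0)]) [0])
      ((j : ℕ) : Int) 0 = cnt (seq.take j) := by
  have hp : ([] : List Int) ++ [(0 : Int)] = [0] := rfl
  rw [← hp, foldl_pref seq [] 0, hp]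
  have : ([(0 : Int)] ++ (List.range seq.length).map (fun i => 0 + cnt (seq.take (i + 1))))
      = (List.range (seq.length + 1)).map (fun i => cnt (seq.take i)) := by
    rw [List.range_succ_eq_map, List.map_cons, List.map_map]
    simp [cnt, Function.comp]
  rw [this, PySem.List.pyGetD_natCast, PySem.List.getD_map_range _ _ _ _ (by omega)]

theorem window_count_iff (l : List Int) (σ k : ℕ) (h : σ + k ≤ l.length) :
    ((l.drop σ).take k).countP (fun x => x == 1) = k ↔
      ∀ j, σ ≤ j → j < σ + k → l.getD j 0 = 1 := by
  have hlen : ((l.drop σ).take k).length = k := by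
    simp [List.length_take, List.length_drop]; omega
  rw [← window_iff l σ k h, List.eq_replicate_iff]
  constructor
  · intro hc
    refine ⟨hlen, fun b hb => ?_⟩
    have := List.countP_eq_length.mp (by rw [hc, hlen]) b hb
    simpa using this
  · rintro ⟨_, hall⟩
    rw [List.countP_eq_length.mpr (fun a ha => by simp [hall a ha]), hlen]

theorem B_iff (K : Int) (seq : List Int) :
    check_for_k_alt K seq = true ↔ 0 ≤ K ∧ ∃ e, e ≤ seq.length ∧ Wend seq K.toNat e := by
  unfold check_for_k_alt
  by_cases hneg : K < 0
  · simp only [hneg, decide_true, Bool.true_or, if_true]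
    simp; omega
  by_cases hbig : (seq.length : Int) < K
  · simp only [hneg, hbig, decide_true, decide_false, Bool.or_true, if_true]
    constructor
    · intro h; simp at h
    · rintro ⟨hK, e, he, hke, _⟩
      exfalso; omega
  · have hK : 0 ≤ K := by omega
    have hKn : K.toNat ≤ seq.length := by omega
    simp only [hneg, hbig, decide_false, Bool.or_false]
    rw [if_neg Bool.false_ne_true, List.any_eq_true]
    constructor
    · rintro ⟨s, hs, hw⟩
      rw [PySem.List.mem_pyRange_one] at hs
      obtain ⟨hs0, hs1⟩ := hs
      obtain ⟨σ, rfl⟩ : ∃ σ : ℕ, s = (σ : Int) := ⟨s.toNat, by omega⟩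
      have hsn : σ + K.toNat ≤ seq.length := by omega
      rw [show (σ : Int) + K = ((σ + K.toNat : ℕ) : Int) by omega,
          pref_getD seq _ hsn, pref_getD seq _ (by omega), beq_iff_eq] at hw
      rw [show cnt (seq.take (σ + K.toNat))
            = cnt (seq.take σ) + cnt ((seq.drop σ).take K.toNat) by
          rw [cnt, List.take_add, List.countP_append]; push_cast [cnt]; ring] at hw
      have hc : ((seq.drop σ).take K.toNat).countP (fun x => x == 1) = K.toNat := by
        have : cnt ((seq.drop σ).take K.toNat) = K := by omega
        rw [cnt] at this; omega
      rw [window_count_iff seq σ K.toNat hsn] at hc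
      refine ⟨hK, σ + K.toNat, hsn, by omega, ?_⟩
      intro j h1 h2
      exact hc j (by omega) (by omega)
    · rintro ⟨_, e, he, hke, hwin⟩
      set σ : ℕ := e - K.toNat with hσ
      have hsn : σ + K.toNat ≤ seq.length := by omega
      refine ⟨((σ : ℕ) : Int), ?_, ?_⟩
      · rw [PySem.List.mem_pyRange_one]
        exact ⟨Int.natCast_nonneg _, by omega⟩
      · have hc : ((seq.drop σ).take K.toNat).countP (fun x => x == 1) = K.toNat :=
          (window_count_iff seq σ K.toNat hsn).mpr (fun j h1 h2 => hwin j (by omega) (by omega))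
        rw [show (σ : Int) + K = ((σ + K.toNat : ℕ) : Int) by omega,
            pref_getD seq _ hsn, pref_getD seq _ (by omega), beq_iff_eq]
        rw [show cnt (seq.take (σ + K.toNat))
              = cnt (seq.take σ) + cnt ((seq.drop σ).take K.toNat) by
            rw [cnt, List.take_add, List.countP_append]; push_cast [cnt]; ring]
        simp only [cnt, hc]
        omega

theorem D_iff (K : Int) (seq : List Int) :
    D_check_for_k K seq ↔ 0 ≤ K ∧ Wend seq K.toNat seq.length ∧
      ¬ ∃ e, e < seq.length ∧ Wend seq K.toNat e := by
  unfold D_check_for_k Wend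
  constructor
  · rintro ⟨h1, h2, h3, h4⟩
    exact ⟨h1, ⟨h2, h3⟩, by simpa using h4⟩
  · rintro ⟨h1, ⟨h2, h3⟩, h4⟩
    exact ⟨h1, h2, h3, by simpa using h4⟩

theorem A_eq_false_of_D (K : Int) (seq : List Int) (hd : D_check_for_k K seq) :
    check_for_k K seq = false := by
  rw [D_iff] at hd
  cases hA : check_for_k K seq with
  | false => rfl
  | true =>
    rw [A_iff] at hA
    exact absurd ⟨hA.2.choose, hA.2.choose_spec⟩ hd.2.2

theorem B_eq_true_of_D (K : Int) (seq : List Int) (hd : D_check_for_k K seq) :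
    check_for_k_alt K seq = true := by
  rw [D_iff] at hd
  rw [B_iff]
  exact ⟨hd.1, seq.length, Nat.le_refl _, hd.2.1⟩

-- ===== VERDICT (by name: the statements are the Claim_ definitions above) =====
theorem check_for_k_spec : Claim_unchanged_check_for_k := by
  intro K seq _ hnD
  cases hA : check_for_k K seq with
  | true =>
    rw [A_iff] at hA
    obtain ⟨hK, e, he, hw⟩ := hA
    exact (B_iff K seq).2 ⟨hK, e, Nat.le_of_lt he, hw⟩ |>.symm
  | false =>
    cases hB : check_for_k_alt K seq with
    | false => rfl
    | true =>
      exfalso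
      rw [B_iff] at hB
      obtain ⟨hK, e, he, hw⟩ := hB
      have hAfalse : ¬ ∃ e, e < seq.length ∧ Wend seq K.toNat e := by
        intro ⟨e', he', hw'⟩
        have : check_for_k K seq = true := (A_iff K seq).2 ⟨hK, e', he', hw'⟩
        rw [hA] at this; exact Bool.false_ne_true this
      have hen : e = seq.length := by
        rcases Nat.lt_or_ge e seq.length with h | h
        · exact absurd ⟨e, h, hw⟩ hAfalse
        · omega
      exact hnD ((D_iff K seq).2 ⟨hK, hen ▸ hw, hAfalse⟩)

theorem check_for_k_changed : Claim_changed_check_for_k := by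
  unfold Claim_changed_check_for_k; decide

theorem check_for_k_tight : Claim_exact_check_for_k := by
  intro K seq _ hd
  rw [A_eq_false_of_D K seq hd, B_eq_true_of_D K seq hd]
  exact Bool.false_ne_true
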